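-- pv_equiv track=rewrite | github.com/LuisHVieira/tictactoe | functions_commands.py | mention
-- ===== SOURCE A (Python) =====
-- def mention(msg_mention):
-- 	split_msg_metion = msg_mention.split('@')
-- 	add_mention = ''
-- 	for pos, splits in zip(range(len(split_msg_metion)), split_msg_metion):
-- 		if pos == 1:
-- 			add_mention += '@!'
--
-- 		add_mention += splits
--
-- 	return add_mention
-- ===== SOURCE B (Python) =====
-- def mention(msg_mention):
--     out = []
--     seen = False
--     for ch in msg_mention:
--         if ch == '@':
--             if not seen:
--                 out.append('@!')
--                 seen = True
--         else:
--             out.append(ch)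
--     return ''.join(out)
-- ===== Notes on version B (the rewrite author's own statement) =====
-- stated objective: simpler
-- what changed: Replaces A's split-on-'@' plus enumerate-and-rejoin loop by a single character scan with a 'seen' flag that emits '@!' at the first '@' and drops every later '@'.
import Mathlib
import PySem

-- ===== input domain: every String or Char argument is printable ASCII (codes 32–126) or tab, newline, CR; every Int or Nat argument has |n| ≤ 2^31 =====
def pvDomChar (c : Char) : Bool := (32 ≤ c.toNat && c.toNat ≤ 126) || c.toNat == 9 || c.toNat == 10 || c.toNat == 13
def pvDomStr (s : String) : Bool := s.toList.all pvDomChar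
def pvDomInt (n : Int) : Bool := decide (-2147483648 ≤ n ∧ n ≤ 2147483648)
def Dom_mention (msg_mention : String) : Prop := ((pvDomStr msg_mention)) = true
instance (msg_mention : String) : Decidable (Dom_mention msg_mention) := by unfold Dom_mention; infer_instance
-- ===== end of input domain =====

-- B replaces A's split-on-'@'-and-rejoin loop by a single left-to-right character scan with a 'seen' flag (simpler, one pass, no intermediate list of pieces).

-- ===== PORT A =====
def mention (msg_mention : String) : String :=
  let split_msg_metion := (PySem.Str.split? msg_mention "@").getD []
  List.foldl
    (fun add_mention (p : Int × String) =>
      (if p.1 == 1 then add_mention ++ "@!" else add_mention) ++ p.2)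
    "" (PySem.List.enumerate split_msg_metion)

-- ===== PORT B =====
def mention_alt (msg_mention : String) : String :=
  let st := msg_mention.toList.foldl
    (fun (st : List String × Bool) ch =>
      if ch == '@' then
        (if st.2 then st else (st.1 ++ ["@!"], true))
      else (st.1 ++ [String.ofList [ch]], st.2))
    ([], false)
  PySem.Str.join "" st.1

-- ===== PRECONDITION & SPEC =====
def Spec_mention (msg_mention : String) (out : String) : Prop := out = mention_alt msg_mention
instance (msg_mention : String) (out : String) : Decidable (Spec_mention msg_mention out) := by unfold Spec_mention; infer_instance

-- ===== CLAIM (what is proved, stated in full; the proofs are below) =====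
def Claim_equal_mention : Prop := ∀ (msg_mention : String), Dom_mention msg_mention → Spec_mention msg_mention (mention msg_mention)

-- ===== LEMMAS AND PROOFS =====

/-- Reference result on the character level: `seen` records whether the first '@' was passed. -/
def pvRef (seen : Bool) : List Char → List Char
  | [] => []
  | x :: t =>
      if x = '@' then (if seen then pvRef true t else '@' :: '!' :: pvRef true t)
      else x :: pvRef seen t

/-- Reference split on '@', always nonempty. -/
def pvSplitC : List Char → List (List Char)
  | [] => [[]]
  | x :: t =>
      if x = '@' then [] :: pvSplitC t
      else match pvSplitC t with
           | [] => [[x]]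
           | h :: r => (x :: h) :: r

def pvConsHead (p : List Char) : List (List Char) → List (List Char)
  | [] => []
  | h :: r => (p ++ h) :: r

theorem pvSplitC_ne_nil (cs : List Char) : pvSplitC cs ≠ [] := by
  cases cs with
  | nil => simp [pvSplitC]
  | cons x t =>
      simp only [pvSplitC]
      split_ifs
      · simp
      · cases h : pvSplitC t <;> simp

theorem pv_go_eq (fuel : Nat) : ∀ (l cur : List Char) (accs : List (List Char)),
    l.length ≤ fuel →
    PySem.Chars.splitOn.go ['@'] fuel l cur accs =
      accs.reverse ++ pvConsHead cur.reverse (pvSplitC l) := by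
  induction fuel with
  | zero =>
      intro l cur accs h
      have : l = [] := by cases l <;> simp_all
      subst this
      simp [PySem.Chars.splitOn.go, pvSplitC, pvConsHead]
  | succ f ih =>
      intro l cur accs h
      cases l with
      | nil => simp [PySem.Chars.splitOn.go, pvSplitC, pvConsHead]
      | cons c rest =>
          by_cases hc : c = '@'
          · subst hc
            have hpre : List.isPrefixOf ['@'] ('@' :: rest) = true := by
              simp [List.isPrefixOf]
            rw [PySem.Chars.splitOn.go]
            simp only [hpre, if_pos]
            simp only [List.length_cons, List.length_nil, List.drop_succ_cons, List.drop_zero]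
            rw [ih rest [] (cur.reverse :: accs) (by simpa using Nat.le_of_succ_le_succ h)]
            simp [pvSplitC]
            cases hP : pvSplitC rest with
            | nil => exact absurd hP (pvSplitC_ne_nil rest)
            | cons h0 r0 => simp [pvConsHead]
          · have hpre : List.isPrefixOf ['@'] (c :: rest) = false := by
              simp [List.isPrefixOf]
              intro hcc
              exact absurd hcc.symm hc
            rw [PySem.Chars.splitOn.go]
            simp only [hpre, Bool.false_eq_true, if_neg, not_false_eq_true]
            rw [ih rest (c :: cur) accs (by simpa using Nat.le_of_succ_le_succ h)]
            simp only [pvSplitC, hc, if_neg, not_false_eq_true]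
            cases hP : pvSplitC rest with
            | nil => exact absurd hP (pvSplitC_ne_nil rest)
            | cons h0 r0 => simp [pvConsHead]

theorem pv_splitOn_eq (cs : List Char) :
    PySem.Chars.splitOn cs ['@'] = pvSplitC cs := by
  unfold PySem.Chars.splitOn
  rw [pv_go_eq (cs.length + 1) cs [] [] (Nat.le_succ _)]
  cases hP : pvSplitC cs with
  | nil => exact absurd hP (pvSplitC_ne_nil cs)
  | cons h r => simp [pvConsHead]

theorem pv_flatten_splitC (cs : List Char) :
    (pvSplitC cs).flatten = pvRef true cs := by
  induction cs with
  | nil => simp [pvSplitC, pvRef]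
  | cons x t ih =>
      by_cases hx : x = '@'
      · subst hx; simp [pvSplitC, pvRef, ih]
      · simp only [pvSplitC, pvRef, hx, if_neg, not_false_eq_true]
        cases hP : pvSplitC t with
        | nil => exact absurd hP (pvSplitC_ne_nil t)
        | cons h0 r0 =>
            rw [hP] at ih
            simp at ih ⊢
            simp [← ih]

/-- A's value as a function of the pieces. -/
def pvAval : List (List Char) → List Char
  | [] => []
  | h :: r => h ++ (if r = [] then [] else '@' :: '!' :: r.flatten)

theorem pv_Aval_splitC (cs : List Char) : pvAval (pvSplitC cs) = pvRef false cs := by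
  induction cs with
  | nil => simp [pvSplitC, pvAval, pvRef]
  | cons x t ih =>
      by_cases hx : x = '@'
      · subst hx
        simp only [pvSplitC, pvRef, if_pos]
        cases hP : pvSplitC t with
        | nil => exact absurd hP (pvSplitC_ne_nil t)
        | cons h0 r0 =>
            have := pv_flatten_splitC t
            rw [hP] at this
            simp [pvAval, ← this]
      · simp only [pvSplitC, pvRef, hx, if_neg, not_false_eq_true]
        cases hP : pvSplitC t with
        | nil => exact absurd hP (pvSplitC_ne_nil t)
        | cons h0 r0 =>
            rw [hP] at ih
            simp only [pvAval] at ih ⊢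
            simp [← ih]

/-- The tail of A's fold, once the position is ≥ 2, just concatenates. -/
theorem pv_foldA_ge2 (ps : List String) : ∀ (start : Int) (acc : String), 2 ≤ start →
    (List.foldl
      (fun add_mention (p : Int × String) =>
        (if p.1 == 1 then add_mention ++ "@!" else add_mention) ++ p.2)
      acc (PySem.List.enumerate ps start)).toList =
      acc.toList ++ (ps.map String.toList).flatten := by
  induction ps with
  | nil => intro start acc h; simp [PySem.List.enumerate]
  | cons p t ih =>
      intro start acc h
      have hne : (start == 1) = false := by
        simp only [beq_eq_false_iff_ne, ne_eq]
        omega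
      simp only [PySem.List.enumerate, List.foldl, hne, Bool.false_eq_true, if_neg,
        not_false_eq_true]
      rw [ih (start + 1) (acc ++ p) (by omega)]
      simp

theorem pv_mention_toList (msg : String) :
    (mention msg).toList = pvRef false msg.toList := by
  unfold mention
  rw [show (PySem.Str.split? msg "@").getD [] =
        (pvSplitC msg.toList).map String.ofList by
      simp [PySem.Str.split?, PySem.Chars.split?, pv_splitOn_eq]]
  rw [← pv_Aval_splitC msg.toList]
  cases hP : pvSplitC msg.toList with
  | nil => exact absurd hP (pvSplitC_ne_nil msg.toList)
  | cons h r =>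
      cases r with
      | nil => simp [PySem.List.enumerate, pvAval]
      | cons q r' =>
          simp only [List.map_cons, PySem.List.enumerate, List.foldl]
          simp only [show (((0:Int)) == 1) = false from rfl,
            show (((0:Int) + 1) == 1) = true from rfl,
            show ((0:Int) + 1 + 1) = 2 from by norm_num,
            Bool.false_eq_true, if_neg, if_pos, not_false_eq_true]
          rw [pv_foldA_ge2 (r'.map String.ofList) 2 _ (by norm_num)]
          simp [pvAval, List.map_map, Function.comp_def]

theorem pv_foldB_inv (cs : List Char) : ∀ (out : List String) (seen : Bool),
    ((cs.foldl
        (fun (st : List String × Bool) ch =>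
          if ch == '@' then
            (if st.2 then st else (st.1 ++ ["@!"], true))
          else (st.1 ++ [String.ofList [ch]], st.2))
        (out, seen)).1.map String.toList).flatten =
      (out.map String.toList).flatten ++ pvRef seen cs := by
  induction cs with
  | nil => intro out seen; simp [pvRef]
  | cons x t ih =>
      intro out seen
      by_cases hx : x = '@'
      · subst hx
        cases seen with
        | false =>
            simp only [List.foldl, beq_self_eq_true, if_pos, Bool.false_eq_true, if_neg,
              not_false_eq_true]
            rw [ih (out ++ ["@!"]) true]
            simp [pvRef]
        | true =>
            simp only [List.foldl, beq_self_eq_true, if_pos]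
            rw [ih out true]
            simp [pvRef]
      · have : (x == '@') = false := by simp [hx]
        simp only [List.foldl, this, Bool.false_eq_true, if_neg, not_false_eq_true]
        rw [ih (out ++ [String.ofList [x]]) seen]
        simp [pvRef, hx]

theorem pv_join_flatten (ps : List String) :
    (PySem.Str.join "" ps).toList = (ps.map String.toList).flatten := by
  unfold PySem.Str.join PySem.Chars.join
  induction ps with
  | nil => simp [List.intercalate]
  | cons p t ih =>
      cases t with
      | nil => simp [List.intercalate]
      | cons q t' =>
          simp only [List.intercalate, List.map_cons] at ih ⊢
          simp [List.intersperse] at ih ⊢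
          simpa using ih

theorem pv_mention_alt_toList (msg : String) :
    (mention_alt msg).toList = pvRef false msg.toList := by
  unfold mention_alt
  rw [pv_join_flatten]
  rw [pv_foldB_inv msg.toList [] false]
  simp

-- ===== VERDICT (by name: the statement is the Claim_ definition above) =====
theorem mention_spec : Claim_equal_mention := by
  intro msg _
  unfold Spec_mention
  rw [← String.toList_inj, pv_mention_toList, pv_mention_alt_toList]
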